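-- pv_equiv track=rewrite | github.com/j2kun/restrepo-1957 | code/utils.py | subsequent_pairs
-- ===== SOURCE A (Python) =====
-- def subsequent_pairs(the_iterable):
--     '''
--     Given an iterable (a, b, c, d, ...) return a generator over
--     pairs (a, b), (b, c), (c, d), ...
--
--     Return an empty iterable if
--     '''
--     it = iter(the_iterable)
--
--     try:
--         pair_first = next(it)
--         pair_second = next(it)
--     except StopIteration:
--         return
--
--     while True:
--         yield (pair_first, pair_second)
--         try:
--             pair_first = pair_second
--             pair_second = next(it)
--         except StopIteration:
--             return
-- ===== SOURCE B (Python) =====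
-- def subsequent_pairs(the_iterable):
--     '''
--     Given an iterable (a, b, c, d, ...) return a generator over
--     pairs (a, b), (b, c), (c, d), ...
--     '''
--     seq = list(the_iterable)
--     return ((seq[i], seq[i + 1]) for i in range(len(seq) - 1))
-- ===== Notes on version B (the rewrite author's own statement) =====
-- stated objective: alternative
-- what changed: B materialises the iterable into a list once and produces pairs by random-access indexing (seq[i], seq[i+1]) over range(len(seq)-1), instead of A's single-pass streaming loop with manual next() calls and carried pair state.
import Mathlib
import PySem

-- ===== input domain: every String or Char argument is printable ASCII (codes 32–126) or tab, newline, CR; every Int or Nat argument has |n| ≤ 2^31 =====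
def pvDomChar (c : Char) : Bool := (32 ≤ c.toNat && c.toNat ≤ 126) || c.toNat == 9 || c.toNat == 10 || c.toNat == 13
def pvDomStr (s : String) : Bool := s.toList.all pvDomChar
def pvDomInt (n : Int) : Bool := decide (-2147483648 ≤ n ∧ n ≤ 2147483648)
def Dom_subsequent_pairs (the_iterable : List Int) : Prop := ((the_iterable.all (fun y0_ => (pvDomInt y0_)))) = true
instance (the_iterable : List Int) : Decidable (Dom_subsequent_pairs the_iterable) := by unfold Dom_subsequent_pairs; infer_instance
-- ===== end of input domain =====

-- B materialises the input into a list and indexes pairs (seq[i], seq[i+1]) over range(len-1), instead of A's streaming loop with manual next() calls; objective: alternative decomposition, same cost.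


-- ===== PORT A =====
-- the while-loop: state (pair_first, pair_second), consuming the rest of the iterator
def subsequentPairsLoop (pair_first pair_second : Int) (rest : List Int) : List (Int × Int) :=
  match rest with
  | [] => [(pair_first, pair_second)]          -- yield, then next(it) raises StopIteration
  | x :: xs => (pair_first, pair_second) :: subsequentPairsLoop pair_second x xs

def subsequent_pairs (the_iterable : List Int) : List (Int × Int) :=
  match the_iterable with
  | a :: b :: rest => subsequentPairsLoop a b rest   -- the two initial next() calls
  | _ => []                                          -- StopIteration during setup: empty generator

-- ===== PORT B =====
-- seq = list(...); ((seq[i], seq[i+1]) for i in range(len(seq)-1)); indices i, i+1 are always in range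
def subsequent_pairs_alt (the_iterable : List Int) : List (Int × Int) :=
  (PySem.List.pyRange 0 ((the_iterable.length : Int) - 1) 1).map
    (fun i => (PySem.List.pyGetD the_iterable i 0, PySem.List.pyGetD the_iterable (i + 1) 0))

-- ===== PRECONDITION & SPEC =====
def Spec_subsequent_pairs (the_iterable : List Int) (out : List (Int × Int)) : Prop := out = subsequent_pairs_alt the_iterable
instance (the_iterable : List Int) (out : List (Int × Int)) : Decidable (Spec_subsequent_pairs the_iterable out) := by unfold Spec_subsequent_pairs; infer_instance

-- ===== CLAIM (what is proved, stated in full; the proofs are below) =====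
def Claim_equal_subsequent_pairs : Prop := ∀ (the_iterable : List Int), Dom_subsequent_pairs the_iterable → Spec_subsequent_pairs the_iterable (subsequent_pairs the_iterable)

-- ===== LEMMAS AND PROOFS =====
theorem subsequentPairsLoop_eq_zip (rest : List Int) : ∀ (f s : Int),
    subsequentPairsLoop f s rest = (f, s) :: List.zip (s :: rest) rest := by
  induction rest with
  | nil => intro f s; simp [subsequentPairsLoop]
  | cons x xs ih => intro f s; simp [subsequentPairsLoop, ih, List.zip]

theorem subsequent_pairs_eq_zip (xs : List Int) :
    subsequent_pairs xs = List.zip xs (xs.drop 1) := by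
  match xs with
  | [] => rfl
  | [a] => rfl
  | a :: b :: rest => simp [subsequent_pairs, subsequentPairsLoop_eq_zip, List.zip]

theorem alt_eq_zip (xs : List Int) :
    subsequent_pairs_alt xs = List.zip xs (xs.drop 1) := by
  unfold subsequent_pairs_alt
  rw [PySem.List.pyRange_one]
  apply List.ext_getElem
  · simp [List.length_zip]
  · intro k h1 h2
    simp only [List.getElem_map, List.getElem_range, List.getElem_zip]
    have hk : k < xs.length - 1 := by
      simp at h1; omega
    have h0 : (0 : Int) + (k : Int) = (k : Int) := by ring
    rw [h0]
    have hcast : ((k : Int) + 1) = ((k + 1 : Nat) : Int) := by push_cast; ring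
    rw [hcast]
    rw [PySem.List.pyGetD_natCast, PySem.List.pyGetD_natCast]
    have hk1 : k < xs.length := by omega
    have hk2 : k + 1 < xs.length := by omega
    simp [List.getD, hk1, hk2]

-- ===== VERDICT (by name: the statement is the Claim_ definition above) =====
theorem subsequent_pairs_spec : Claim_equal_subsequent_pairs := by
  intro xs _
  unfold Spec_subsequent_pairs
  rw [subsequent_pairs_eq_zip, alt_eq_zip]
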